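-- pv_equiv track=rewrite | github.com/vsimundic/ur5-door-interaction | ferit_ur5_ws/src/cosper/force_manipulation/src/analysis.py | compute_column_indices
-- ===== SOURCE A (Python) =====
-- def compute_column_indices(header):
--     col_idx = {}
--     idx = 0
--     # while idx < len(header):
--     for name in header:
--         # name = header[idx]
--         if name in {"R_A_C", "R_C_E", "R_E_0", 'R_A_S', 'R_Ek_E'}:
--             col_idx[name] = idx
--             idx += 9
--         elif name in {"t_A_C", "t_C_E", "t_E_0", 't_A_S', 't_Ek_E', 'V'}:
--             col_idx[name] = idx
--             idx += 3
--         else: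
--             col_idx[name] = idx
--             idx += 1
--     return col_idx
-- ===== SOURCE B (Python) =====
-- _ROT = {"R_A_C", "R_C_E", "R_E_0", "R_A_S", "R_Ek_E"}
-- _VEC = {"t_A_C", "t_C_E", "t_E_0", "t_A_S", "t_Ek_E", "V"}
--
--
-- def _width(name):
--     return 9 if name in _ROT else 3 if name in _VEC else 1
--
--
-- def _offsets(names):
--     # Divide and conquer: (exclusive column offsets inside this block, total block width).
--     # Each half is solved independently; the right half's offsets are shifted by the
--     # left half's total width when the halves are merged.
--     if not names:
--         return [], 0
--     if len(names) == 1: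
--         return [0], _width(names[0])
--     mid = len(names) // 2
--     left, lw = _offsets(names[:mid])
--     right, rw = _offsets(names[mid:])
--     return left + [lw + o for o in right], lw + rw
--
--
-- def compute_column_indices(header):
--     offsets, _ = _offsets(header)
--     return dict(zip(header, offsets))
-- ===== Notes on version B (the rewrite author's own statement) =====
-- stated objective: alternative
-- what changed: Replaces A's single running dict+index accumulator loop by a divide-and-conquer: offsets of each half of the header are computed independently and the right half is shifted by the left half's total width, then the dict is built with dict(zip(header, offsets)).
import Mathlib
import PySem

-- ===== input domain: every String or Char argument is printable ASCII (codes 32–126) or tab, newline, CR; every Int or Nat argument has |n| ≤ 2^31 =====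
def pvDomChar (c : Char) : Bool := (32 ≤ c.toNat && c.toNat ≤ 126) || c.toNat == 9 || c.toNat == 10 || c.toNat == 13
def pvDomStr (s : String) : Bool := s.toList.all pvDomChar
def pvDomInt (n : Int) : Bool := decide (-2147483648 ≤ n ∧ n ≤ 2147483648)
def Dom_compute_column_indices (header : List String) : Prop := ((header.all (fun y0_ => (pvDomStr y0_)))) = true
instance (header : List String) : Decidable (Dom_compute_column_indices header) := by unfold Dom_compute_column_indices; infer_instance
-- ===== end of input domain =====

-- B replaces A's running dict+index accumulator by divide-and-conquer offsets (halves solved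
-- independently, right half shifted by the left half's total width) + dict(zip); alternative, same order of cost.

-- ===== PORT A =====
-- one loop step of A: insert the current index under the name, bump idx by the name's column width
def pvStepA (st : PySem.Dict String Int × Int) (name : String) : PySem.Dict String Int × Int :=
  if name ∈ ["R_A_C", "R_C_E", "R_E_0", "R_A_S", "R_Ek_E"] then
    (st.1.insert name st.2, st.2 + 9)
  else if name ∈ ["t_A_C", "t_C_E", "t_E_0", "t_A_S", "t_Ek_E", "V"] then
    (st.1.insert name st.2, st.2 + 3)
  else
    (st.1.insert name st.2, st.2 + 1)

def compute_column_indices (header : List String) : List (String × Int) :=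
  (header.foldl pvStepA (PySem.Dict.empty, 0)).1.items

-- ===== PORT B =====
-- Source B's _width
def pvWidthB (name : String) : Int :=
  if name ∈ ["R_A_C", "R_C_E", "R_E_0", "R_A_S", "R_Ek_E"] then 9
  else if name ∈ ["t_A_C", "t_C_E", "t_E_0", "t_A_S", "t_Ek_E", "V"] then 3
  else 1

-- Source B's _offsets: divide and conquer on the half-split of the list
def pvOffsets (names : List String) : List Int × Int :=
  if h0 : names = [] then ([], 0)
  else if h1 : names.length = 1 then ([0], pvWidthB (names.headI))
  else
    let mid := names.length / 2
    let left := pvOffsets (names.take mid)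
    let right := pvOffsets (names.drop mid)
    (left.1 ++ right.1.map (fun o => left.2 + o), left.2 + right.2)
termination_by names.length
decreasing_by
  all_goals
    have hp : 0 < names.length := List.length_pos_of_ne_nil h0
    simp [List.length_take, List.length_drop]
    omega

def compute_column_indices_alt (header : List String) : List (String × Int) :=
  ((header.zip (pvOffsets header).1).foldl (fun d p => d.insert p.1 p.2) PySem.Dict.empty).items

-- ===== PRECONDITION & SPEC =====
def Spec_compute_column_indices (header : List String) (out : List (String × Int)) : Prop := out = compute_column_indices_alt header
instance (header : List String) (out : List (String × Int)) : Decidable (Spec_compute_column_indices header out) := by unfold Spec_compute_column_indices; infer_instance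

-- ===== CLAIM (what is proved, stated in full; the proofs are below) =====
def Claim_equal_compute_column_indices : Prop := ∀ (header : List String), Dom_compute_column_indices header → Spec_compute_column_indices header (compute_column_indices header)

-- ===== LEMMAS AND PROOFS =====

-- exclusive prefix sums of a width list: the linear characterisation of B's D&C result
def pvExclSums (total : Int) : List Int → List Int
  | [] => []
  | w :: ws => total :: pvExclSums (total + w) ws

theorem pvStepA_eq (st : PySem.Dict String Int × Int) (name : String) :
    pvStepA st name = (st.1.insert name st.2, st.2 + pvWidthB name) := by
  unfold pvStepA pvWidthB
  split_ifs <;> simp_all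

theorem pvExclSums_shift (ws : List Int) : ∀ (s t : Int),
    pvExclSums (s + t) ws = (pvExclSums t ws).map (fun o => s + o) := by
  induction ws with
  | nil => intro s t; rfl
  | cons w ws ih =>
    intro s t
    simp only [pvExclSums, List.map_cons]
    rw [show s + t + w = s + (t + w) by ring, ih]

theorem pvExclSums_append (ws1 ws2 : List Int) : ∀ (t : Int),
    pvExclSums t (ws1 ++ ws2) = pvExclSums t ws1 ++ pvExclSums (t + ws1.sum) ws2 := by
  induction ws1 with
  | nil => intro t; simp [pvExclSums]
  | cons w ws ih =>
    intro t
    simp only [List.cons_append, pvExclSums, ih, List.sum_cons]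
    rw [show t + (w + ws.sum) = t + w + ws.sum by ring]

-- characterisation of B's divide-and-conquer: exclusive prefix sums of the widths, plus their total
theorem pvOffsets_eq (names : List String) :
    pvOffsets names = (pvExclSums 0 (names.map pvWidthB), (names.map pvWidthB).sum) := by
  fun_induction pvOffsets names with
  | case1 => simp [pvExclSums]
  | case2 names h0 h1 =>
    match names, h1 with
    | [n], _ => simp [pvExclSums]
  | case3 names h0 h1 mid left right ihl ihr =>
    simp only [left, right]
    rw [ihl, ihr]
    have hsplit : names.map pvWidthB
        = (names.take mid).map pvWidthB ++ (names.drop mid).map pvWidthB := by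
      rw [← List.map_append, List.take_append_drop]
    rw [hsplit, pvExclSums_append, List.sum_append]
    have hshift : pvExclSums (0 + ((names.take mid).map pvWidthB).sum) ((names.drop mid).map pvWidthB)
        = (pvExclSums 0 ((names.drop mid).map pvWidthB)).map
            (fun o => ((names.take mid).map pvWidthB).sum + o) := by
      rw [show (0 : Int) + ((names.take mid).map pvWidthB).sum
            = ((names.take mid).map pvWidthB).sum + 0 by ring, pvExclSums_shift]
    rw [hshift]

-- main invariant: A's fold from any (d, i) equals the zip-fold over exclusive prefix sums from i
theorem pv_main (header : List String) : ∀ (d : PySem.Dict String Int) (i : Int),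
    (header.foldl pvStepA (d, i)).1 =
      (header.zip (pvExclSums i (header.map pvWidthB))).foldl (fun d p => d.insert p.1 p.2) d := by
  induction header with
  | nil => intro d i; rfl
  | cons name rest ih =>
    intro d i
    simp only [List.foldl_cons, List.map_cons, pvExclSums, List.zip_cons_cons, pvStepA_eq]
    exact ih (d.insert name i) (i + pvWidthB name)

-- ===== VERDICT (by name: the statement is the Claim_ definition above) =====
theorem compute_column_indices_spec : Claim_equal_compute_column_indices := by
  intro header _
  show _ = _
  unfold compute_column_indices compute_column_indices_alt
  rw [pvOffsets_eq, pv_main]
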